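-- pv_equiv track=rewrite | github.com/nigel-campbell/Daily-Programmer | challenge172e.py | getLineFromString
-- ===== SOURCE A (Python) =====
-- def getLineFromString(lineNumber, string):
-- 	line = ''
-- 	currentLine = 0
-- 	for char in string:
-- 		if char == '\n':
-- 			currentLine += 1
-- 			continue
-- 		if currentLine == lineNumber:
-- 			line+=char
-- 		if currentLine != lineNumber:
-- 			continue
-- 	line += ' '
-- 	return line
-- ===== SOURCE B (Python) =====
-- def getLineFromString(lineNumber, string):
--     lines = string.split('\n')
--     if 0 <= lineNumber < len(lines):
--         return lines[lineNumber] + ' '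
--     return ' '
-- ===== Notes on version B (the rewrite author's own statement) =====
-- stated objective: idiomatic
-- what changed: A accumulates the target line char-by-char while counting newlines in one manual pass; B materializes all lines with string.split(' ') and returns the bounds-guarded indexed line plus ' ' (or ' ' when the index is out of range, as A does).
import Mathlib
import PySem

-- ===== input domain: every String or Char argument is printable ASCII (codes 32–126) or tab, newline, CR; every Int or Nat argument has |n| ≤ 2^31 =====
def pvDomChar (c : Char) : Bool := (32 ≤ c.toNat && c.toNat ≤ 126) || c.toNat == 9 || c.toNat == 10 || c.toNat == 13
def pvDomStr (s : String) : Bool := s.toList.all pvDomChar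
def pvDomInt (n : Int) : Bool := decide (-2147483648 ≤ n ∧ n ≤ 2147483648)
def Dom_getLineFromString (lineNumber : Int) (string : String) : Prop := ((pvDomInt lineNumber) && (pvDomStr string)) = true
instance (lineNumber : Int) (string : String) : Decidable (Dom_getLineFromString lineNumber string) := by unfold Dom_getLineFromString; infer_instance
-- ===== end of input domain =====

-- B replaces A's char-by-char accumulation with split('\n') and a bounds-guarded index (idiomatic; same O(n) cost).

-- ===== PORT A =====
-- A: one pass over the characters, accumulating chars of the current line while counting '\n'.
def getLineFromString (lineNumber : Int) (string : String) : String :=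
  let r := string.toList.foldl (fun (st : List Char × Int) char =>
    if char = '\n' then (st.1, st.2 + 1)
    else if st.2 = lineNumber then (st.1 ++ [char], st.2)
    else st) ([], 0)
  String.ofList (r.1 ++ [' '])

-- ===== PORT B =====
-- B: string.split('\n') ported as List.splitOn '\n' (exact for a single-char separator), then a bounds-guarded index.
def getLineFromString_alt (lineNumber : Int) (string : String) : String :=
  let lines := string.toList.splitOn '\n'
  if 0 ≤ lineNumber ∧ lineNumber < lines.length then
    String.ofList (lines.getD lineNumber.toNat []) ++ " "
  else " "

-- ===== PRECONDITION & SPEC =====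
def Spec_getLineFromString (lineNumber : Int) (string : String) (out : String) : Prop := out = getLineFromString_alt lineNumber string
instance (lineNumber : Int) (string : String) (out : String) : Decidable (Spec_getLineFromString lineNumber string out) := by unfold Spec_getLineFromString; infer_instance

-- ===== CLAIM (what is proved, stated in full; the proofs are below) =====
def Claim_equal_getLineFromString : Prop := ∀ (lineNumber : Int) (string : String), Dom_getLineFromString lineNumber string → Spec_getLineFromString lineNumber string (getLineFromString lineNumber string)

-- ===== LEMMAS AND PROOFS =====

-- the line at (possibly negative / out-of-range) index k, else []
def pvLineAt (ls : List (List Char)) (k : Int) : List Char :=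
  if 0 ≤ k ∧ k < ls.length then ls.getD k.toNat [] else []

theorem pvLineAt_cons (t : List Char) (ls : List (List Char)) (k : Int) :
    pvLineAt (t :: ls) k = if k = 0 then t else pvLineAt ls (k - 1) := by
  have hlen : ((t :: ls).length : Int) = (ls.length : Int) + 1 := by simp
  unfold pvLineAt
  by_cases h2 : k = 0
  · subst h2; simp
  · rw [if_neg h2]
    by_cases h : 0 ≤ k - 1 ∧ k - 1 < (ls.length : Int)
    · rw [if_pos (by omega), if_pos h]
      have hk : k.toNat = (k - 1).toNat + 1 := by omega
      rw [hk, List.getD_cons_succ]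
    · rw [if_neg (by omega), if_neg h]

theorem pvFold_invariant (lineNumber : Int) (cs : List Char) :
    ∀ (acc : List Char) (c : Int),
      (cs.foldl (fun (st : List Char × Int) char =>
        if char = '\n' then (st.1, st.2 + 1)
        else if st.2 = lineNumber then (st.1 ++ [char], st.2)
        else st) (acc, c)).1 = acc ++ pvLineAt (cs.splitOn '\n') (lineNumber - c) := by
  induction cs with
  | nil =>
    intro acc c
    simp only [List.foldl_nil, List.splitOn, List.splitOnP_nil]
    unfold pvLineAt
    have hl : (([([] : List Char)] : List (List Char)).length : Int) = 1 := by simp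
    by_cases h : lineNumber - c = 0
    · rw [if_pos (by omega)]; simp [h]
    · rw [if_neg (by omega)]; simp
  | cons ch cs ih =>
    intro acc c
    by_cases hnl : ch = '\n'
    · subst hnl
      simp only [List.foldl_cons]
      rw [ih]
      have hs : ('\n' :: cs).splitOn '\n' = [] :: cs.splitOn '\n' := by
        simp [List.splitOn, List.splitOnP_cons]
      rw [hs, pvLineAt_cons]
      by_cases h : lineNumber - c = 0
      · have h1 : lineNumber - (c + 1) = -1 := by omega
        simp [h, h1, pvLineAt]
      · have h1 : lineNumber - (c + 1) = lineNumber - c - 1 := by omega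
        simp [h, h1]
    · obtain ⟨h, t, hs⟩ : ∃ h t, cs.splitOn '\n' = h :: t := by
        rcases e : cs.splitOn '\n' with _ | ⟨h, t⟩
        · exact absurd e (List.splitOnP_ne_nil _ _)
        · exact ⟨h, t, rfl⟩
      have hs2 : (ch :: cs).splitOn '\n' = (ch :: h) :: t := by
        simp [List.splitOn, List.splitOnP_cons, hnl]
        rw [show cs.splitOnP (· == '\n') = cs.splitOn '\n' from rfl, hs]
        rfl
      simp only [List.foldl_cons, if_neg hnl]
      by_cases hc : c = lineNumber
      · simp only [hc]
        rw [ih, hs, hs2, ← hc]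
        simp [pvLineAt_cons]
      · simp only [if_neg hc]
        rw [ih, hs, hs2, pvLineAt_cons, pvLineAt_cons]
        have : lineNumber - c ≠ 0 := by omega
        simp [this]

-- ===== VERDICT (by name: the statement is the Claim_ definition above) =====
theorem getLineFromString_spec : Claim_equal_getLineFromString := by
  intro lineNumber string _
  unfold Spec_getLineFromString getLineFromString getLineFromString_alt
  simp only
  rw [pvFold_invariant lineNumber string.toList [] 0, List.nil_append]
  have h0 : lineNumber - 0 = lineNumber := by omega
  rw [h0]
  unfold pvLineAt
  split_ifs with h
  · rw [String.ofList_append]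
  · rfl
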